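-- pv_equiv track=rewrite | github.com/andwc/lib-pku | 大一下/数据结构与算法B/部分题解/最大点数（同2048规则）.py | dfs
-- ===== SOURCE A (Python) =====
-- def f(d,ma):
--     nma=[[0]*len(ma[0]) for _ in range(len(ma))]
--     if d==0:
--         for j in range(len(ma[0])):
--             num=[]
--             for i in range(len(ma)):
--                 if ma[i][j]!=0:
--                     num.append(ma[i][j])
--             i=0
--             cnt=0
--             while i<len(num):
--                 if i+1<len(num) and num[i]==num[i+1]:
--                     nma[i-cnt][j]=num[i]*2
--                     i+=2
--                     cnt+=1
--                 else:
--                     nma[i-cnt][j]=num[i]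
--                     i+=1
--     if d==2:
--         for j in range(len(ma[0])):
--             num=[]
--             for i in range(len(ma)):
--                 if ma[i][j]!=0:
--                     num.append(ma[i][j])
--             i=-1
--             cnt=0
--             while i>=-len(num):
--                 if i-1>=-len(num) and num[i]==num[i-1]:
--                     nma[i+cnt][j]=num[i]*2
--                     i-=2
--                     cnt+=1
--                 else:
--                     nma[i+cnt][j]=num[i]
--                     i-=1
--     if d==1:
--         for i in range(len(ma)):
--             num=[]
--             for j in range(len(ma[0])):
--                 if ma[i][j]!=0:
--                     num.append(ma[i][j])
--             j=-1
--             cnt=0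
--             while j>=-len(num):
--                 if j-1>=-len(num) and num[j]==num[j-1]:
--                     nma[i][j+cnt]=num[j]*2
--                     j-=2
--                     cnt+=1
--                 else:
--                     nma[i][j+cnt]=num[j]
--                     j-=1
--     if d==3:
--         for i in range(len(ma)):
--             num=[]
--             for j in range(len(ma[0])):
--                 if ma[i][j]!=0:
--                     num.append(ma[i][j])
--             j=0
--             cnt=0
--             while j<len(num):
--                 if j+1<len(num) and num[j]==num[j+1]:
--                     nma[i][j-cnt]=num[j]*2
--                     j+=2
--                     cnt+=1
--                 else:
--                     nma[i][j-cnt]=num[j]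
--                     j+=1
--     return nma
--
-- def dfs(ma,step):
--     ans=0
--     if step==0:
--         for i in ma:
--             ans=max(ans,max(i))
--         return ans
--     for i in range(4):
--         ans=max(ans,dfs(f(i,ma),step-1))
--     return ans
-- ===== SOURCE B (Python) =====
-- # B: different algorithm on both layers. The move is computed per line by a
-- # squeeze/merge helper applied to rows/columns (with reversal for the two
-- # mirrored directions) instead of A's four index-juggling while loops, and the
-- # search is an iterative breadth-first level expansion over a deduplicated SET
-- # of boards instead of A's naive 4^step recursion.
-- def dfs(ma, step):
--     def squeeze(vals, n):
--         vals = [v for v in vals if v != 0]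
--         out = []
--         k = 0
--         while k < len(vals):
--             if k + 1 < len(vals) and vals[k] == vals[k + 1]:
--                 out.append(vals[k] * 2)
--                 k += 2
--             else:
--                 out.append(vals[k])
--                 k += 1
--         return out + [0] * (n - len(out))
--
--     def move(d, board):
--         r, c = len(board), len(board[0])
--         if d == 0:  # up: each column squeezed toward the top
--             cols = [squeeze([board[i][j] for i in range(r)], r) for j in range(c)]
--             return [[cols[j][i] for j in range(c)] for i in range(r)]
--         if d == 2:  # down: columns squeezed toward the bottom
--             cols = [squeeze([board[i][j] for i in range(r - 1, -1, -1)], r) for j in range(c)]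
--             return [[cols[j][r - 1 - i] for j in range(c)] for i in range(r)]
--         if d == 3:  # left
--             return [squeeze(board[i][:c], c) for i in range(r)]
--         # d == 1: right
--         return [list(reversed(squeeze(list(reversed(board[i][:c])), c))) for i in range(r)]
--
--     boards = {tuple(tuple(row) for row in ma)}
--     for _ in range(step):
--         boards = {tuple(tuple(row) for row in move(d, b)) for b in boards for d in range(4)}
--     best = 0
--     for b in boards:
--         for row in b:
--             for v in row:
--                 if v > best:
--                     best = v
--     return best
-- ===== Notes on version B (the rewrite author's own statement) =====
-- stated objective: alternative
-- what changed: B recomputes the move per line with a single squeeze/merge helper applied to rows or columns (reversed for the mirrored directions) instead of A's four index-juggling while loops, and replaces A's naive 4^step recursion by an iterative breadth-first expansion of a deduplicated set of boards, taking the max tile over the final level.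
import Mathlib
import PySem

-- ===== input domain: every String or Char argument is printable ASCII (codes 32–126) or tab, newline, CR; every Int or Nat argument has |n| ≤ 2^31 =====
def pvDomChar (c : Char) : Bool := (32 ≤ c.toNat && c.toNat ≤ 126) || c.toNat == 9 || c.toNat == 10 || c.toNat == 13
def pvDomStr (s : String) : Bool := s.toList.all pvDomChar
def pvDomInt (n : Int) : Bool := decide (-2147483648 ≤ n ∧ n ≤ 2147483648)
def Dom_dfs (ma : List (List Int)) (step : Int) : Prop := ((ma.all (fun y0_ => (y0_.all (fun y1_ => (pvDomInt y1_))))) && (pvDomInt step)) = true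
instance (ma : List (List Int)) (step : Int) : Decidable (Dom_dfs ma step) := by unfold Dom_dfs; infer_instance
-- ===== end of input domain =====

-- B recomputes each move per line with a single squeeze/merge helper (reversing lines for the two
-- mirrored directions) and replaces A's 4^step recursion by an iterative breadth-first expansion of a
-- deduplicated set of boards; equivalence is about the return value (neither mutates its argument).


-- ===== PORT A =====
-- nma[r][c] = v  (r, c already nonnegative in-range positions)
def setAt (nma : List (List Int)) (r c : Nat) (v : Int) : List (List Int) :=
  nma.set r ((nma.getD r []).set c v)

-- num = [ma[i][j] for i in range(len(ma)) if ma[i][j] != 0]  (column j; under Pre_ j < row length,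
-- so getD's default is never consulted on admitted inputs)
def colNz (ma : List (List Int)) (j : Nat) : List Int :=
  ma.foldl (fun num row => if row.getD j 0 ≠ 0 then num ++ [row.getD j 0] else num) []

-- num = [ma[i][j] for j in range(cols) if ma[i][j] != 0]  (row i)
def rowNz (row : List Int) (cols : Nat) : List Int :=
  (List.range cols).foldl (fun num j => if row.getD j 0 ≠ 0 then num ++ [row.getD j 0] else num) []

-- the forward while-loop of d==0 / d==3 (writes at in-line position i-cnt via `write`)
def fwdLoop (num : List Int) (write : List (List Int) → Nat → Int → List (List Int))
    (i cnt : Nat) (nma : List (List Int)) : List (List Int) :=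
  if _h : i < num.length then
    if i + 1 < num.length ∧ num.getD i 0 = num.getD (i + 1) 0 then
      fwdLoop num write (i + 2) (cnt + 1) (write nma (i - cnt) (num.getD i 0 * 2))
    else
      fwdLoop num write (i + 1) cnt (write nma (i - cnt) (num.getD i 0))
  else nma
termination_by num.length - i
decreasing_by all_goals omega

-- the backward while-loop of d==2 / d==1 (Python's negative index i+cnt is resolved by `write`)
def bwdLoop (num : List Int) (write : List (List Int) → Int → Int → List (List Int))
    (i : Int) (cnt : Int) (nma : List (List Int)) : List (List Int) :=
  if _h : -(num.length : Int) ≤ i then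
    if -(num.length : Int) ≤ i - 1 ∧ PySem.List.pyGetD num i 0 = PySem.List.pyGetD num (i - 1) 0 then
      bwdLoop num write (i - 2) (cnt + 1) (write nma (i + cnt) (PySem.List.pyGetD num i 0 * 2))
    else
      bwdLoop num write (i - 1) cnt (write nma (i + cnt) (PySem.List.pyGetD num i 0))
  else nma
termination_by (i + num.length + 1).toNat
decreasing_by all_goals omega

-- f(d, ma): the four sequential `if d==…` blocks of A, in A's order
def fA (d : Int) (ma : List (List Int)) : List (List Int) :=
  let rows := ma.length
  let cols := (ma.headD []).length    -- len(ma[0]); Pre_ excludes ma = [] on the recursive path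
  let nma0 := List.replicate rows (List.replicate cols (0 : Int))
  let nma1 := if d = 0 then
      (List.range cols).foldl (fun nma j => fwdLoop (colNz ma j) (fun n p v => setAt n p j v) 0 0 nma) nma0
    else nma0
  let nma2 := if d = 2 then
      (List.range cols).foldl (fun nma j =>
        bwdLoop (colNz ma j) (fun n p v => setAt n ((rows : Int) + p).toNat j v) (-1) 0 nma) nma1
    else nma1
  let nma3 := if d = 1 then
      (List.range rows).foldl (fun nma i =>
        bwdLoop (rowNz (ma.getD i []) cols) (fun n p v => setAt n i ((cols : Int) + p).toNat v) (-1) 0 nma) nma2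
    else nma2
  let nma4 := if d = 3 then
      (List.range rows).foldl (fun nma i =>
        fwdLoop (rowNz (ma.getD i []) cols) (fun n p v => setAt n i p v) 0 0 nma) nma3
    else nma3
  nma4

-- ans = 0; for i in ma: ans = max(ans, max(i))  (max(i) on an empty row raises → excluded by Pre_)
def baseMax (ma : List (List Int)) : Int :=
  ma.foldl (fun ans row => max ans ((PySem.List.max? row (fun x => x)).getD 0)) 0

-- A's dfs: the `for i in range(4)` accumulation unrolled; step < 0 makes Python recurse forever,
-- which Pre_ excludes (the port returns 0 there for totality)
def dfs (ma : List (List Int)) (step : Int) : Int :=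
  if step = 0 then baseMax ma
  else if step < 0 then 0
  else
    let a0 := max 0 (dfs (fA 0 ma) (step - 1))
    let a1 := max a0 (dfs (fA 1 ma) (step - 1))
    let a2 := max a1 (dfs (fA 2 ma) (step - 1))
    let a3 := max a2 (dfs (fA 3 ma) (step - 1))
    a3
termination_by step.toNat
decreasing_by all_goals omega

-- ===== PORT B =====
-- the inner while loop of B's squeeze, on the already-filtered values
def packB : List Int → List Int
  | [] => []
  | [x] => [x]
  | x :: y :: rest => if x = y then x * 2 :: packB rest else x :: packB (y :: rest)

-- squeeze(vals, n): drop zeros, merge equal neighbours greedily, pad with zeros to length n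
def squeezeB (vals : List Int) (n : Nat) : List Int :=
  packB (vals.filter (fun v => v ≠ 0)) ++
    List.replicate (n - (packB (vals.filter (fun v => v ≠ 0))).length) 0

-- move(d, board): rows/columns squeezed toward the appropriate edge
def moveB (d : Int) (b : List (List Int)) : List (List Int) :=
  let r := b.length
  let c := (b.headD []).length
  if d = 0 then
    let cols := (List.range c).map (fun j => squeezeB ((List.range r).map (fun i => (b.getD i []).getD j 0)) r)
    (List.range r).map (fun i => (List.range c).map (fun j => (cols.getD j []).getD i 0))
  else if d = 2 then
    let cols := (List.range c).map (fun j =>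
      squeezeB ((List.range r).map (fun i => (b.getD (r - 1 - i) []).getD j 0)) r)
    (List.range r).map (fun i => (List.range c).map (fun j => (cols.getD j []).getD (r - 1 - i) 0))
  else if d = 3 then
    (List.range r).map (fun i => squeezeB ((b.getD i []).take c) c)
  else
    (List.range r).map (fun i => (squeezeB ((b.getD i []).take c).reverse c).reverse)

-- `for _ in range(step): boards = {move(d,b) for b in boards for d in range(4)}`
def levelB : Nat → PySem.Set (List (List Int)) → PySem.Set (List (List Int))
  | 0, s => s
  | n + 1, s =>
    levelB n (PySem.Set.ofList (s.flatMap (fun b => [moveB 0 b, moveB 1 b, moveB 2 b, moveB 3 b])))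

-- best = 0; for b in boards: for row in b: for v in row: if v > best: best = v
def maxOverB (s : List (List (List Int))) : Int :=
  s.foldl (fun best b =>
    b.foldl (fun best row => row.foldl (fun best v => if v > best then v else best) best) best) 0

def dfs_alt (ma : List (List Int)) (step : Int) : Int :=
  maxOverB (levelB step.toNat (PySem.Set.ofList [ma]))

-- ===== PRECONDITION & SPEC =====
-- Pre_ admits exactly the inputs where Python A returns: step ≥ 0 (negative step never terminates);
-- at step = 0 every row must be nonempty (max([]) raises); at step > 0 f needs ma ≠ [] and every
-- row at least as long as ma[0] (shorter rows raise IndexError), and ma[0] nonempty so that the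
-- boards produced by f have nonempty rows when step reaches 0.
def Pre_dfs (ma : List (List Int)) (step : Int) : Prop :=
  0 ≤ step ∧
  (if step = 0 then ∀ row ∈ ma, row ≠ []
   else ma ≠ [] ∧ 0 < (ma.headD []).length ∧ ∀ row ∈ ma, (ma.headD []).length ≤ row.length)

instance (ma : List (List Int)) (step : Int) : Decidable (Pre_dfs ma step) := by
  unfold Pre_dfs; infer_instance

def pvWitness_dfs : List (List Int) × Int := ([[2, 2], [0, 2]], 2)

def Spec_dfs (ma : List (List Int)) (step : Int) (out : Int) : Prop := out = dfs_alt ma step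
instance (ma : List (List Int)) (step : Int) (out : Int) : Decidable (Spec_dfs ma step out) := by
  unfold Spec_dfs; infer_instance

-- ===== CLAIM (what is proved, stated in full; the proofs are below) =====
def Claim_equal_dfs : Prop := ∀ (ma : List (List Int)) (step : Int),
  Dom_dfs ma step → Pre_dfs ma step → Spec_dfs ma step (dfs ma step)

-- ===== LEMMAS AND PROOFS =====

-- matrix entry / rectangular-shape infrastructure
def entryM (M : List (List Int)) (i j : Nat) : Int := (M.getD i []).getD j 0

def RectM (M : List (List Int)) (r c : Nat) : Prop := M.length = r ∧ ∀ row ∈ M, row.length = c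

-- the board shape A's recursion keeps alive: nonempty, first row nonempty, no row shorter than it
def ShapeB (b : List (List Int)) : Prop :=
  b ≠ [] ∧ 0 < (b.headD []).length ∧ ∀ row ∈ b, (b.headD []).length ≤ row.length

-- writes l at consecutive positions p, p+1, … through `write`
def writeSeq (w : List (List Int) → Nat → Int → List (List Int)) :
    Nat → List Int → List (List Int) → List (List Int)
  | _, [], M => M
  | p, v :: vs, M => writeSeq w (p + 1) vs (w M p v)

lemma getD_set_eq {α : Type} (l : List α) (n m : Nat) (v d : α) :
    (l.set n v).getD m d = if m = n ∧ n < l.length then v else l.getD m d := by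
  simp [List.getD_eq_getElem?_getD, List.getElem?_set]
  split_ifs <;> simp_all <;> omega

lemma getD_row_setAt (M : List (List Int)) (a b i : Nat) (v : Int) :
    (setAt M a b v).getD i [] =
      if i = a ∧ a < M.length then (M.getD a []).set b v else M.getD i [] := by
  rw [setAt, getD_set_eq]

lemma rowlen_of_rect {M : List (List Int)} {r c : Nat} (h : RectM M r c) {i : Nat} (hi : i < r) :
    (M.getD i []).length = c := by
  obtain ⟨hl, hrow⟩ := h
  have hi' : i < M.length := by omega
  rw [List.getD_eq_getElem M _ hi']
  exact hrow _ (List.getElem_mem hi')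

lemma Rect_setAt {M : List (List Int)} {r c : Nat} (h : RectM M r c) (a b : Nat) (v : Int) :
    RectM (setAt M a b v) r c := by
  obtain ⟨hl, hrow⟩ := h
  by_cases ha : a < M.length
  · refine ⟨by simp [setAt, hl], ?_⟩
    intro row hr
    rw [setAt] at hr
    rcases List.mem_or_eq_of_mem_set hr with h1 | h1
    · exact hrow _ h1
    · subst h1
      rw [List.length_set, List.getD_eq_getElem M _ ha]
      exact hrow _ (List.getElem_mem ha)
  · rw [setAt, List.set_eq_of_length_le (by omega)]
    exact ⟨hl, hrow⟩

lemma entry_setAt {M : List (List Int)} {r c : Nat} (h : RectM M r c) {a b : Nat}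
    (ha : a < r) (hb : b < c) (v : Int) (i j : Nat) :
    entryM (setAt M a b v) i j = if i = a ∧ j = b then v else entryM M i j := by
  have hl : M.length = r := h.1
  have hc : (M.getD a []).length = c := rowlen_of_rect h ha
  unfold entryM
  rw [getD_row_setAt]
  by_cases hi : i = a
  · subst hi
    simp only [hl, ha, and_true, if_pos rfl]
    by_cases hj : j = b
    · subst hj
      rw [List.getD_eq_getElem?_getD] at hc
      simp [List.getD_eq_getElem?_getD, List.getElem?_set, hc, hb]
    · simp [List.getD_eq_getElem?_getD, List.getElem?_set, Ne.symm hj, hj]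
  · simp [hi]

-- column-write sequence: shape preserved, other cells untouched, written cells get l
lemma writeSeq_col (j : Nat) (ρ : Nat → Nat) (r c : Nat) :
    ∀ (l : List Int) (p : Nat) (M : List (List Int)), RectM M r c → j < c →
    (∀ q, q < p + l.length → ρ q < r) →
    (∀ q q', q < p + l.length → q' < p + l.length → ρ q = ρ q' → q = q') →
    RectM (writeSeq (fun M q v => setAt M (ρ q) j v) p l M) r c ∧
    (∀ i j', (j' ≠ j ∨ ∀ q, p ≤ q → q < p + l.length → ρ q ≠ i) →
      entryM (writeSeq (fun M q v => setAt M (ρ q) j v) p l M) i j' = entryM M i j') ∧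
    (∀ q, p ≤ q → q < p + l.length →
      entryM (writeSeq (fun M q v => setAt M (ρ q) j v) p l M) (ρ q) j = l.getD (q - p) 0) := by
  intro l
  induction l with
  | nil =>
    intro p M hM hj _ _
    exact ⟨hM, fun _ _ _ => rfl, fun q h1 h2 => by simp only [List.length_nil] at h2; omega⟩
  | cons v vs ih =>
    intro p M hM hj hr hinj
    rw [writeSeq]
    have hrp : ρ p < r := hr p (by simp only [List.length_cons]; omega)
    have hM1 : RectM (setAt M (ρ p) j v) r c := Rect_setAt hM _ _ _
    obtain ⟨R, U, V⟩ := ih (p + 1) (setAt M (ρ p) j v) hM1 hj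
      (fun q hq => hr q (by simp only [List.length_cons] at hq ⊢; omega))
      (fun q q' hq hq' => hinj q q' (by simp only [List.length_cons] at hq ⊢; omega) (by simp only [List.length_cons] at hq' ⊢; omega))
    refine ⟨R, ?_, ?_⟩
    · intro i j' hcond
      have hcond' : j' ≠ j ∨ ∀ q, p + 1 ≤ q → q < p + 1 + vs.length → ρ q ≠ i := by
        rcases hcond with h | h
        · exact Or.inl h
        · exact Or.inr (fun q h1 h2 => h q (by omega) (by simp only [List.length_cons]; omega))
      rw [U i j' hcond', entry_setAt hM hrp hj]
      rcases hcond with h | h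
      · rw [if_neg (by tauto)]
      · rw [if_neg (by
          rintro ⟨h1, h2⟩
          exact h p (le_refl p) (by simp only [List.length_cons]; omega) h1.symm)]
    · intro q h1 h2
      rcases Nat.eq_or_lt_of_le h1 with he | hlt
      · subst he
        have hnot : ∀ q', p + 1 ≤ q' → q' < p + 1 + vs.length → ρ q' ≠ ρ p := by
          intro q' hq1 hq2 heq
          have := hinj q' p (by simp only [List.length_cons]; omega) (by simp only [List.length_cons]; omega) heq
          omega
        rw [U (ρ p) j (Or.inr hnot), entry_setAt hM hrp hj, if_pos ⟨rfl, rfl⟩]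
        simp
      · have h2' : q < p + 1 + vs.length := by simp only [List.length_cons] at h2; omega
        rw [V q (by omega) h2']
        have hq : q - p = (q - (p + 1)) + 1 := by omega
        rw [hq]
        rfl

-- row-write sequence: the same for writes inside one row i
lemma writeSeq_row (i : Nat) (ρ : Nat → Nat) (r c : Nat) :
    ∀ (l : List Int) (p : Nat) (M : List (List Int)), RectM M r c → i < r →
    (∀ q, q < p + l.length → ρ q < c) →
    (∀ q q', q < p + l.length → q' < p + l.length → ρ q = ρ q' → q = q') →
    RectM (writeSeq (fun M q v => setAt M i (ρ q) v) p l M) r c ∧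
    (∀ i' j', (i' ≠ i ∨ ∀ q, p ≤ q → q < p + l.length → ρ q ≠ j') →
      entryM (writeSeq (fun M q v => setAt M i (ρ q) v) p l M) i' j' = entryM M i' j') ∧
    (∀ q, p ≤ q → q < p + l.length →
      entryM (writeSeq (fun M q v => setAt M i (ρ q) v) p l M) i (ρ q) = l.getD (q - p) 0) := by
  intro l
  induction l with
  | nil =>
    intro p M hM hi _ _
    exact ⟨hM, fun _ _ _ => rfl, fun q h1 h2 => by simp only [List.length_nil] at h2; omega⟩
  | cons v vs ih =>
    intro p M hM hi hr hinj
    rw [writeSeq]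
    have hrp : ρ p < c := hr p (by simp only [List.length_cons]; omega)
    have hM1 : RectM (setAt M i (ρ p) v) r c := Rect_setAt hM _ _ _
    obtain ⟨R, U, V⟩ := ih (p + 1) (setAt M i (ρ p) v) hM1 hi
      (fun q hq => hr q (by simp only [List.length_cons] at hq ⊢; omega))
      (fun q q' hq hq' => hinj q q' (by simp only [List.length_cons] at hq ⊢; omega) (by simp only [List.length_cons] at hq' ⊢; omega))
    refine ⟨R, ?_, ?_⟩
    · intro i' j' hcond
      have hcond' : i' ≠ i ∨ ∀ q, p + 1 ≤ q → q < p + 1 + vs.length → ρ q ≠ j' := by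
        rcases hcond with h | h
        · exact Or.inl h
        · exact Or.inr (fun q h1 h2 => h q (by omega) (by simp only [List.length_cons]; omega))
      rw [U i' j' hcond', entry_setAt hM hi hrp]
      rcases hcond with h | h
      · rw [if_neg (by tauto)]
      · rw [if_neg (by
          rintro ⟨h1, h2⟩
          exact h p (le_refl p) (by simp only [List.length_cons]; omega) h2.symm)]
    · intro q h1 h2
      rcases Nat.eq_or_lt_of_le h1 with he | hlt
      · subst he
        have hnot : ∀ q', p + 1 ≤ q' → q' < p + 1 + vs.length → ρ q' ≠ ρ p := by
          intro q' hq1 hq2 heq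
          have := hinj q' p (by simp only [List.length_cons]; omega) (by simp only [List.length_cons]; omega) heq
          omega
        rw [U i (ρ p) (Or.inr hnot), entry_setAt hM hi hrp, if_pos ⟨rfl, rfl⟩]
        simp
      · have h2' : q < p + 1 + vs.length := by simp only [List.length_cons] at h2; omega
        rw [V q (by omega) h2']
        have hq : q - p = (q - (p + 1)) + 1 := by omega
        rw [hq]
        rfl

-- A's forward while loop is packB written at consecutive positions
lemma fwdLoop_eq (num : List Int) (w : List (List Int) → Nat → Int → List (List Int)) :
    ∀ (i cnt : Nat) (nma : List (List Int)), cnt ≤ i →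
    fwdLoop num w i cnt nma = writeSeq w (i - cnt) (packB (num.drop i)) nma := by
  suffices h : ∀ (k i cnt : Nat) (nma : List (List Int)), num.length - i ≤ k → cnt ≤ i →
      fwdLoop num w i cnt nma = writeSeq w (i - cnt) (packB (num.drop i)) nma by
    intro i cnt nma hc
    exact h num.length i cnt nma (by omega) hc
  intro k
  induction k with
  | zero =>
    intro i cnt nma hk hc
    rw [fwdLoop, dif_neg (by omega), List.drop_eq_nil_of_le (by omega)]
    rfl
  | succ m ih =>
    intro i cnt nma hk hc
    rw [fwdLoop]
    by_cases hi : i < num.length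
    · rw [dif_pos hi]
      have hdrop : num.drop i = num[i] :: num.drop (i + 1) := List.drop_eq_getElem_cons hi
      have hgi : num.getD i 0 = num[i] := List.getD_eq_getElem num 0 hi
      by_cases hpair : i + 1 < num.length ∧ num.getD i 0 = num.getD (i + 1) 0
      · rw [if_pos hpair]
        obtain ⟨h1, h2⟩ := hpair
        have hdrop2 : num.drop (i + 1) = num[i + 1] :: num.drop (i + 2) := List.drop_eq_getElem_cons h1
        have hg2 : num.getD (i + 1) 0 = num[i + 1] := List.getD_eq_getElem num 0 h1
        rw [ih (i + 2) (cnt + 1) _ (by omega) (by omega)]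
        rw [hdrop, hdrop2, packB, if_pos (by rw [← hgi, ← hg2]; exact h2)]
        rw [writeSeq, hgi]
        congr 1
        omega
      · rw [if_neg hpair]
        rw [ih (i + 1) cnt _ (by omega) (by omega)]
        have hpk : packB (num.drop i) = num[i] :: packB (num.drop (i + 1)) := by
          by_cases h1 : i + 1 < num.length
          · have hdrop2 : num.drop (i + 1) = num[i + 1] :: num.drop (i + 2) := List.drop_eq_getElem_cons h1
            have hne : ¬ num[i] = num[i + 1] := by
              intro he
              exact hpair ⟨h1, by rw [List.getD_eq_getElem num 0 hi, List.getD_eq_getElem num 0 h1]; exact he⟩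
            rw [hdrop, hdrop2, packB, if_neg hne, ← hdrop2]
          · have hd1 : num.drop (i + 1) = [] := List.drop_eq_nil_of_le (by omega)
            rw [hdrop, hd1]
            rfl
        rw [hpk, writeSeq, hgi]
        congr 1
        omega
    · rw [dif_neg hi, List.drop_eq_nil_of_le (by omega)]
      rfl

-- A's backward while loop is the forward loop on the reversed line with mirrored write positions
lemma pyGetD_neg' (l : List Int) (i : Int) (h1 : -(l.length : Int) ≤ i) (h2 : i ≤ -1) :
    PySem.List.pyGetD l i 0 = l.reverse.getD (-1 - i).toNat 0 := by
  have hk : i = -(((-i).toNat : Nat) : Int) := by omega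
  rw [hk, PySem.List.pyGetD_neg_natCast _ _ _ (by omega) (by omega)]
  have hlt : (-1 - -(((-i).toNat : Nat) : Int)).toNat < l.reverse.length := by
    rw [List.length_reverse]; omega
  rw [List.getD_eq_getElem _ _ hlt, List.getElem_reverse]
  exact getElem_congr rfl (by omega) _

lemma bwdLoop_eq (num : List Int) (w : List (List Int) → Int → Int → List (List Int)) :
    ∀ (i cnt : Int) (nma : List (List Int)), i ≤ -1 → 0 ≤ cnt → cnt ≤ -1 - i →
    bwdLoop num w i cnt nma =
      fwdLoop num.reverse (fun M p v => w M (-(p : Int) - 1) v) (-1 - i).toNat cnt.toNat nma := by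
  suffices h : ∀ (k : Nat) (i cnt : Int) (nma : List (List Int)), (i + num.length + 1).toNat ≤ k →
      i ≤ -1 → 0 ≤ cnt → cnt ≤ -1 - i →
      bwdLoop num w i cnt nma =
        fwdLoop num.reverse (fun M p v => w M (-(p : Int) - 1) v) (-1 - i).toNat cnt.toNat nma by
    intro i cnt nma h1 h2 h3
    exact h (i + num.length + 1).toNat i cnt nma (le_refl _) h1 h2 h3
  intro k
  induction k with
  | zero =>
    intro i cnt nma hk h1 h2 h3
    rw [bwdLoop, dif_neg (by omega), fwdLoop, dif_neg (by rw [List.length_reverse]; omega)]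
  | succ m ih =>
    intro i cnt nma hk h1 h2 h3
    rw [bwdLoop, fwdLoop]
    by_cases hg : -(num.length : Int) ≤ i
    · rw [dif_pos hg, dif_pos (by rw [List.length_reverse]; omega)]
      have hv : PySem.List.pyGetD num i 0 = num.reverse.getD (-1 - i).toNat 0 := pyGetD_neg' num i hg h1
      by_cases hp : -(num.length : Int) ≤ i - 1 ∧ PySem.List.pyGetD num i 0 = PySem.List.pyGetD num (i - 1) 0
      · rw [if_pos hp]
        obtain ⟨hp1, hp2⟩ := hp
        have hv2 : PySem.List.pyGetD num (i - 1) 0 = num.reverse.getD ((-1 - i).toNat + 1) 0 := by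
          rw [pyGetD_neg' num (i - 1) hp1 (by omega)]
          congr 1
          omega
        rw [if_pos (by
          constructor
          · rw [List.length_reverse]; omega
          · rw [← hv, ← hv2]; exact hp2)]
        rw [ih (i - 2) (cnt + 1) _ (by omega) (by omega) (by omega) (by omega)]
        have he1 : (-1 - (i - 2)).toNat = (-1 - i).toNat + 2 := by omega
        have he2 : (cnt + 1).toNat = cnt.toNat + 1 := by omega
        rw [he1, he2, hv]
        beta_reduce
        have harg : (-(((-1 - i).toNat - cnt.toNat : Nat) : Int) - 1) = i + cnt := by omega
        rw [harg]
      · rw [if_neg hp]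
        rw [if_neg (by
          intro hcon
          obtain ⟨hc1, hc2⟩ := hcon
          rw [List.length_reverse] at hc1
          apply hp
          constructor
          · omega
          · rw [hv, pyGetD_neg' num (i - 1) (by omega) (by omega)]
            have : (-1 - (i - 1)).toNat = (-1 - i).toNat + 1 := by omega
            rw [this]
            exact hc2)]
        rw [ih (i - 1) cnt _ (by omega) (by omega) (by omega) (by omega)]
        have he1 : (-1 - (i - 1)).toNat = (-1 - i).toNat + 1 := by omega
        rw [he1, hv]
        beta_reduce
        have harg : (-(((-1 - i).toNat - cnt.toNat : Nat) : Int) - 1) = i + cnt := by omega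
        rw [harg]
    · rw [dif_neg hg, dif_neg (by rw [List.length_reverse]; omega)]

lemma packB_length_le (l : List Int) : (packB l).length ≤ l.length := by
  fun_induction packB <;> simp_all <;> omega

lemma map_range_getD (ma : List (List Int)) (f : List Int → Int) :
    (List.range ma.length).map (fun i => f (ma.getD i [])) = ma.map f := by
  apply List.ext_getElem
  · simp
  · intro i h1 h2
    have h3 : i < ma.length := by simpa using h2
    simp_all [List.getD_eq_getElem?_getD, List.getElem?_eq_getElem]

lemma map_range_rev_getD (ma : List (List Int)) (f : List Int → Int) :
    (List.range ma.length).map (fun i => f (ma.getD (ma.length - 1 - i) [])) = (ma.map f).reverse := by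
  apply List.ext_getElem
  · simp
  · intro i h1 h2
    have h3 : i < ma.length := by simpa using h1
    have h4 : ma.length - 1 - i < ma.length := by omega
    simp_all [List.getD_eq_getElem?_getD, List.getElem?_eq_getElem, List.getElem_reverse]

lemma map_range_getD_take (row : List Int) (c : Nat) (h : c ≤ row.length) :
    (List.range c).map (fun j => row.getD j 0) = row.take c := by
  apply List.ext_getElem
  · simp; omega
  · intro i h1 h2
    have h3 : i < row.length := by simp at h1; omega
    simp_all [List.getD_eq_getElem?_getD, List.getElem?_eq_getElem]

lemma colNz_eq (ma : List (List Int)) (j : Nat) :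
    colNz ma j = (ma.map (fun row => row.getD j 0)).filter (fun v => v ≠ 0) := by
  unfold colNz
  rw [show (fun (num : List Int) row => if row.getD j 0 ≠ 0 then num ++ [row.getD j 0] else num) =
      (fun (num : List Int) row => if (fun (row : List Int) => decide (row.getD j 0 ≠ 0)) row = true
        then num ++ [(fun (row : List Int) => row.getD j 0) row] else num) from by
    funext a b; split_ifs <;> simp_all]
  rw [PySem.List.foldl_append_if, List.filter_map]
  simp [Function.comp_def]

lemma rowNz_eq (row : List Int) (c : Nat) (h : c ≤ row.length) :
    rowNz row c = (row.take c).filter (fun v => v ≠ 0) := by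
  unfold rowNz
  rw [show (fun (num : List Int) j => if row.getD j 0 ≠ 0 then num ++ [row.getD j 0] else num) =
      (fun (num : List Int) j => if (fun (j : Nat) => decide (row.getD j 0 ≠ 0)) j = true
        then num ++ [(fun (j : Nat) => row.getD j 0) j] else num) from by
    funext a b; split_ifs <;> simp_all]
  rw [PySem.List.foldl_append_if,
    show (fun (j : Nat) => decide (row.getD j 0 ≠ 0)) =
      ((fun v => decide (v ≠ 0)) ∘ (fun (j : Nat) => row.getD j 0)) from rfl,
    ← List.filter_map, map_range_getD_take row c h]
  simp

lemma squeeze_length (vals : List Int) (n : Nat)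
    (h : (packB (vals.filter (fun v => v ≠ 0))).length ≤ n) : (squeezeB vals n).length = n := by
  rw [squeezeB]
  simp only [List.length_append, List.length_replicate]
  omega

lemma squeeze_getD (vals : List Int) (n i : Nat) (hi : i < n)
    (h : (packB (vals.filter (fun v => v ≠ 0))).length ≤ n) :
    (squeezeB vals n).getD i 0 = (packB (vals.filter (fun v => v ≠ 0))).getD i 0 := by
  rw [squeezeB]
  by_cases hl : i < (packB (vals.filter (fun v => v ≠ 0))).length
  · rw [List.getD_eq_getElem _ _ (by simp only [List.length_append, List.length_replicate]; omega),
      List.getElem_append_left hl, List.getD_eq_getElem _ _ hl]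
  · have hr : (packB (vals.filter (fun v => v ≠ 0))).getD i 0 = 0 :=
      List.getD_eq_default _ _ (by omega)
    rw [hr, List.getD_eq_getElem _ _ (by simp only [List.length_append, List.length_replicate]; omega),
      List.getElem_append_right (by omega)]
    simp

lemma matrix_eq {A B : List (List Int)} {r c : Nat} (hA : RectM A r c) (hB : RectM B r c)
    (h : ∀ i j, i < r → j < c → entryM A i j = entryM B i j) : A = B := by
  apply List.ext_getElem (by rw [hA.1, hB.1])
  intro i h1 h2
  apply List.ext_getElem
  · rw [hA.2 _ (List.getElem_mem h1), hB.2 _ (List.getElem_mem h2)]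
  · intro j hj1 hj2
    have hi : i < r := by rw [hA.1] at h1; omega
    have hjc : j < c := by rw [hA.2 _ (List.getElem_mem h1)] at hj1; omega
    have := h i j hi hjc
    unfold entryM at this
    rw [List.getD_eq_getElem A _ h1, List.getD_eq_getElem B _ h2] at this
    rw [List.getD_eq_getElem _ _ hj1, List.getD_eq_getElem _ _ hj2] at this
    exact this

-- the four per-direction fold characterizations over an all-zero matrix
lemma fold_up (r c : Nat) (g : Nat → List Int) (hg : ∀ j, (g j).length ≤ r) :
    ∀ (J : Nat) (M : List (List Int)), J ≤ c → RectM M r c →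
    (∀ i j', i < r → j' < c → entryM M i j' = 0) →
    RectM ((List.range J).foldl (fun nma j => writeSeq (fun n q v => setAt n q j v) 0 (g j) nma) M) r c ∧
    ∀ i j', i < r → j' < c →
      entryM ((List.range J).foldl (fun nma j => writeSeq (fun n q v => setAt n q j v) 0 (g j) nma) M) i j' =
        if j' < J then (g j').getD i 0 else 0 := by
  intro J
  induction J with
  | zero =>
    intro M _ hM hz
    exact ⟨hM, fun i j' hi hj => by simpa using (hz i j' hi hj)⟩
  | succ J ih =>
    intro M hJ hM hz
    rw [List.range_succ, List.foldl_append, List.foldl_cons, List.foldl_nil]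
    obtain ⟨RJ, EJ⟩ := ih M (by omega) hM hz
    obtain ⟨R, U, V⟩ := writeSeq_col J (fun q => q) r c (g J) 0 _ RJ (by omega)
      (fun q hq => by change q < r; have := hg J; omega) (fun q q' _ _ h => h)
    refine ⟨R, ?_⟩
    intro i j' hi hj
    by_cases hjJ : j' = J
    · subst hjJ
      rw [if_pos (by omega)]
      by_cases hil : i < (g j').length
      · have := V i (by omega) (by omega)
        simpa using this
      · rw [U i j' (Or.inr (fun q _ hq he => by omega)), EJ i j' hi hj, if_neg (by omega),
          List.getD_eq_default _ _ (by omega)]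
    · rw [U i j' (Or.inl hjJ), EJ i j' hi hj]
      by_cases hlt : j' < J
      · rw [if_pos hlt, if_pos (by omega)]
      · rw [if_neg hlt, if_neg (by omega)]

lemma fold_down (r c : Nat) (g : Nat → List Int) (hg : ∀ j, (g j).length ≤ r) :
    ∀ (J : Nat) (M : List (List Int)), J ≤ c → RectM M r c →
    (∀ i j', i < r → j' < c → entryM M i j' = 0) →
    RectM ((List.range J).foldl (fun nma j => writeSeq (fun n q v => setAt n (r - 1 - q) j v) 0 (g j) nma) M) r c ∧
    ∀ i j', i < r → j' < c →
      entryM ((List.range J).foldl (fun nma j => writeSeq (fun n q v => setAt n (r - 1 - q) j v) 0 (g j) nma) M) i j' =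
        if j' < J then (g j').getD (r - 1 - i) 0 else 0 := by
  intro J
  induction J with
  | zero =>
    intro M _ hM hz
    exact ⟨hM, fun i j' hi hj => by simpa using (hz i j' hi hj)⟩
  | succ J ih =>
    intro M hJ hM hz
    rw [List.range_succ, List.foldl_append, List.foldl_cons, List.foldl_nil]
    obtain ⟨RJ, EJ⟩ := ih M (by omega) hM hz
    obtain ⟨R, U, V⟩ := writeSeq_col J (fun q => r - 1 - q) r c (g J) 0 _ RJ (by omega)
      (fun q hq => by change r - 1 - q < r; have := hg J; omega)
      (fun q q' hq hq' h => by change r - 1 - q = r - 1 - q' at h; have := hg J; omega)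
    refine ⟨R, ?_⟩
    intro i j' hi hj
    by_cases hjJ : j' = J
    · subst hjJ
      rw [if_pos (by omega)]
      by_cases hil : r - 1 - i < (g j').length
      · have := V (r - 1 - i) (by omega) (by omega)
        have he : r - 1 - (r - 1 - i) = i := by omega
        rw [he] at this
        simpa using this
      · rw [U i j' (Or.inr (fun q _ hq he => by omega)), EJ i j' hi hj, if_neg (by omega),
          List.getD_eq_default _ _ (by omega)]
    · rw [U i j' (Or.inl hjJ), EJ i j' hi hj]
      by_cases hlt : j' < J
      · rw [if_pos hlt, if_pos (by omega)]
      · rw [if_neg hlt, if_neg (by omega)]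

lemma fold_left (r c : Nat) (g : Nat → List Int) (hg : ∀ i, (g i).length ≤ c) :
    ∀ (I : Nat) (M : List (List Int)), I ≤ r → RectM M r c →
    (∀ i j', i < r → j' < c → entryM M i j' = 0) →
    RectM ((List.range I).foldl (fun nma i => writeSeq (fun n q v => setAt n i q v) 0 (g i) nma) M) r c ∧
    ∀ i j', i < r → j' < c →
      entryM ((List.range I).foldl (fun nma i => writeSeq (fun n q v => setAt n i q v) 0 (g i) nma) M) i j' =
        if i < I then (g i).getD j' 0 else 0 := by
  intro I
  induction I with
  | zero =>
    intro M _ hM hz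
    exact ⟨hM, fun i j' hi hj => by simpa using (hz i j' hi hj)⟩
  | succ I ih =>
    intro M hI hM hz
    rw [List.range_succ, List.foldl_append, List.foldl_cons, List.foldl_nil]
    obtain ⟨RI, EI⟩ := ih M (by omega) hM hz
    obtain ⟨R, U, V⟩ := writeSeq_row I (fun q => q) r c (g I) 0 _ RI (by omega)
      (fun q hq => by change q < c; have := hg I; omega) (fun q q' _ _ h => h)
    refine ⟨R, ?_⟩
    intro i j' hi hj
    by_cases hiI : i = I
    · subst hiI
      rw [if_pos (by omega)]
      by_cases hil : j' < (g i).length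
      · have := V j' (by omega) (by omega)
        simpa using this
      · rw [U i j' (Or.inr (fun q _ hq he => by omega)), EI i j' hi hj, if_neg (by omega),
          List.getD_eq_default _ _ (by omega)]
    · rw [U i j' (Or.inl hiI), EI i j' hi hj]
      by_cases hlt : i < I
      · rw [if_pos hlt, if_pos (by omega)]
      · rw [if_neg hlt, if_neg (by omega)]

lemma fold_right (r c : Nat) (g : Nat → List Int) (hg : ∀ i, (g i).length ≤ c) :
    ∀ (I : Nat) (M : List (List Int)), I ≤ r → RectM M r c →
    (∀ i j', i < r → j' < c → entryM M i j' = 0) →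
    RectM ((List.range I).foldl (fun nma i => writeSeq (fun n q v => setAt n i (c - 1 - q) v) 0 (g i) nma) M) r c ∧
    ∀ i j', i < r → j' < c →
      entryM ((List.range I).foldl (fun nma i => writeSeq (fun n q v => setAt n i (c - 1 - q) v) 0 (g i) nma) M) i j' =
        if i < I then (g i).getD (c - 1 - j') 0 else 0 := by
  intro I
  induction I with
  | zero =>
    intro M _ hM hz
    exact ⟨hM, fun i j' hi hj => by simpa using (hz i j' hi hj)⟩
  | succ I ih =>
    intro M hI hM hz
    rw [List.range_succ, List.foldl_append, List.foldl_cons, List.foldl_nil]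
    obtain ⟨RI, EI⟩ := ih M (by omega) hM hz
    obtain ⟨R, U, V⟩ := writeSeq_row I (fun q => c - 1 - q) r c (g I) 0 _ RI (by omega)
      (fun q hq => by change c - 1 - q < c; have := hg I; omega)
      (fun q q' hq hq' h => by change c - 1 - q = c - 1 - q' at h; have := hg I; omega)
    refine ⟨R, ?_⟩
    intro i j' hi hj
    by_cases hiI : i = I
    · subst hiI
      rw [if_pos (by omega)]
      by_cases hil : c - 1 - j' < (g i).length
      · have := V (c - 1 - j') (by omega) (by omega)
        have he : c - 1 - (c - 1 - j') = j' := by omega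
        rw [he] at this
        simpa using this
      · rw [U i j' (Or.inr (fun q _ hq he => by omega)), EI i j' hi hj, if_neg (by omega),
          List.getD_eq_default _ _ (by omega)]
    · rw [U i j' (Or.inl hiI), EI i j' hi hj]
      by_cases hlt : i < I
      · rw [if_pos hlt, if_pos (by omega)]
      · rw [if_neg hlt, if_neg (by omega)]

lemma Rect_nma0 (r c : Nat) : RectM (List.replicate r (List.replicate c (0 : Int))) r c := by
  constructor
  · simp
  · intro row hr
    rw [List.eq_of_mem_replicate hr]
    simp

lemma entry_nma0 (r c i j : Nat) : entryM (List.replicate r (List.replicate c (0 : Int))) i j = 0 := by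
  unfold entryM
  by_cases hi : i < r
  · have h1 : (List.replicate r (List.replicate c (0 : Int))).getD i [] = List.replicate c 0 := by
      rw [List.getD_eq_getElem _ _ (by simpa using hi)]
      simp
    rw [h1]
    by_cases hj : j < c
    · rw [List.getD_eq_getElem _ _ (by simpa using hj)]
      simp
    · rw [List.getD_eq_default _ _ (by simpa using hj)]
  · have h1 : (List.replicate r (List.replicate c (0 : Int))).getD i [] = [] :=
      List.getD_eq_default _ _ (by simpa using hi)
    rw [h1]
    simp

-- the four move equalities
lemma writeSeq_congr (w1 w2 : List (List Int) → Nat → Int → List (List Int)) :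
    ∀ (l : List Int) (p : Nat) (M : List (List Int)),
    (∀ q v M', p ≤ q → q < p + l.length → w1 M' q v = w2 M' q v) →
    writeSeq w1 p l M = writeSeq w2 p l M := by
  intro l
  induction l with
  | nil => intro p M _; rfl
  | cons v vs ih =>
    intro p M h
    rw [writeSeq, writeSeq, h p v M (le_refl p) (by simp only [List.length_cons]; omega)]
    exact ih (p + 1) _ (fun q v M' h1 h2 => h q v M' (by omega) (by simp only [List.length_cons]; omega))

lemma rowNz_nil (c : Nat) : rowNz [] c = [] := by
  unfold rowNz
  have h : ∀ (l : List Nat) (acc : List Int),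
      l.foldl (fun num j => if ([] : List Int).getD j 0 ≠ 0 then num ++ [([] : List Int).getD j 0] else num) acc = acc := by
    intro l
    induction l with
    | nil => intro acc; rfl
    | cons x xs ih => intro acc; rw [List.foldl_cons, if_neg (by simp)]; exact ih acc
  exact h _ []

lemma getD_reverse' (l : List Int) (j : Nat) (hj : j < l.length) :
    l.reverse.getD j 0 = l.getD (l.length - 1 - j) 0 := by
  rw [List.getD_eq_getElem _ _ (by simpa using hj), List.getElem_reverse,
    List.getD_eq_getElem _ _ (by omega)]

lemma rowNz_len (b : List (List Int)) (hrows : ∀ row ∈ b, (b.headD []).length ≤ row.length) (i : Nat) :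
    (rowNz (b.getD i []) (b.headD []).length).length ≤ (b.headD []).length := by
  by_cases hi : i < b.length
  · have hm : b.getD i [] ∈ b := by
      rw [List.getD_eq_getElem _ _ hi]
      exact List.getElem_mem hi
    rw [rowNz_eq _ _ (hrows _ hm)]
    exact le_trans (List.length_filter_le _ _) (by simp)
  · have hd : b.getD i [] = [] := List.getD_eq_default _ _ (by omega)
    rw [hd, rowNz_nil]
    simp

lemma entry_map_matrix (r : Nat) (f : Nat → List Int) (i : Nat) (hi : i < r) :
    ((List.range r).map f).getD i [] = f i := by
  rw [List.getD_eq_getElem _ _ (by simpa using hi)]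
  simp

lemma getD_map_range_int (c : Nat) (f : Nat → Int) (j : Nat) (hj : j < c) :
    ((List.range c).map f).getD j 0 = f j := by
  rw [List.getD_eq_getElem _ _ (by simpa using hj)]
  simp

lemma colNz_len_le (b : List (List Int)) (j : Nat) : (colNz b j).length ≤ b.length := by
  rw [colNz_eq]
  calc ((b.map (fun row => row.getD j 0)).filter (fun v => v ≠ 0)).length
      ≤ (b.map (fun row => row.getD j 0)).length := List.length_filter_le _ _
    _ = b.length := List.length_map ..

lemma moveB_0 (b : List (List Int)) : moveB 0 b =
    (List.range b.length).map (fun i => (List.range (b.headD []).length).map (fun j =>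
      (((List.range (b.headD []).length).map (fun j =>
        squeezeB ((List.range b.length).map (fun i => (b.getD i []).getD j 0)) b.length)).getD j []).getD i 0)) := by
  simp [moveB]

lemma moveB_2 (b : List (List Int)) : moveB 2 b =
    (List.range b.length).map (fun i => (List.range (b.headD []).length).map (fun j =>
      (((List.range (b.headD []).length).map (fun j =>
        squeezeB ((List.range b.length).map (fun i => (b.getD (b.length - 1 - i) []).getD j 0)) b.length)).getD j []).getD (b.length - 1 - i) 0)) := by
  simp [moveB]

lemma moveB_3 (b : List (List Int)) : moveB 3 b =
    (List.range b.length).map (fun i => squeezeB ((b.getD i []).take (b.headD []).length) (b.headD []).length) := by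
  simp [moveB]

lemma moveB_1 (b : List (List Int)) : moveB 1 b =
    (List.range b.length).map (fun i =>
      (squeezeB ((b.getD i []).take (b.headD []).length).reverse (b.headD []).length).reverse) := by
  simp [moveB]

lemma fA_0 (b : List (List Int)) : fA 0 b =
    (List.range (b.headD []).length).foldl
      (fun nma j => fwdLoop (colNz b j) (fun n p v => setAt n p j v) 0 0 nma)
      (List.replicate b.length (List.replicate (b.headD []).length (0 : Int))) := by
  simp [fA]

lemma fA_2 (b : List (List Int)) : fA 2 b =
    (List.range (b.headD []).length).foldl
      (fun nma j => bwdLoop (colNz b j) (fun n p v => setAt n ((b.length : Int) + p).toNat j v) (-1) 0 nma)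
      (List.replicate b.length (List.replicate (b.headD []).length (0 : Int))) := by
  simp [fA]

lemma fA_1 (b : List (List Int)) : fA 1 b =
    (List.range b.length).foldl
      (fun nma i => bwdLoop (rowNz (b.getD i []) (b.headD []).length)
        (fun n p v => setAt n i (((b.headD []).length : Int) + p).toNat v) (-1) 0 nma)
      (List.replicate b.length (List.replicate (b.headD []).length (0 : Int))) := by
  simp [fA]

lemma fA_3 (b : List (List Int)) : fA 3 b =
    (List.range b.length).foldl
      (fun nma i => fwdLoop (rowNz (b.getD i []) (b.headD []).length) (fun n p v => setAt n i p v) 0 0 nma)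
      (List.replicate b.length (List.replicate (b.headD []).length (0 : Int))) := by
  simp [fA]

lemma move_eq_0 {b : List (List Int)} (hb : ShapeB b) : moveB 0 b = fA 0 b := by
  obtain ⟨hne, hc0, hrows⟩ := hb
  have hglen : ∀ j, (packB (colNz b j)).length ≤ b.length :=
    fun j => le_trans (packB_length_le _) (colNz_len_le b j)
  rw [fA_0, moveB_0]
  rw [show (fun (nma : List (List Int)) j => fwdLoop (colNz b j) (fun n p v => setAt n p j v) 0 0 nma) =
      (fun (nma : List (List Int)) j => writeSeq (fun n q v => setAt n q j v) 0 (packB (colNz b j)) nma) from by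
    funext nma j
    rw [fwdLoop_eq _ _ 0 0 nma (le_refl 0), List.drop_zero]]
  obtain ⟨RA, EA⟩ := fold_up b.length (b.headD []).length (fun j => packB (colNz b j)) hglen
    (b.headD []).length _ (le_refl _) (Rect_nma0 _ _) (fun i j hi hj => entry_nma0 _ _ i j)
  have hcolNz : ∀ j, ((List.range b.length).map (fun i => (b.getD i []).getD j 0)).filter (fun v => v ≠ 0) = colNz b j := by
    intro j
    rw [map_range_getD b (fun row => row.getD j 0), ← colNz_eq]
  have hBrect : RectM ((List.range b.length).map (fun i => (List.range (b.headD []).length).map (fun j =>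
      (((List.range (b.headD []).length).map (fun j =>
        squeezeB ((List.range b.length).map (fun i => (b.getD i []).getD j 0)) b.length)).getD j []).getD i 0)))
      b.length (b.headD []).length := by
    constructor
    · simp
    · intro row hrow
      simp only [List.mem_map] at hrow
      obtain ⟨i, _, hrow⟩ := hrow
      rw [← hrow]
      simp
  apply matrix_eq hBrect RA
  intro i j hi hj
  unfold entryM
  rw [entry_map_matrix b.length _ i hi, getD_map_range_int (b.headD []).length _ j hj,
    entry_map_matrix (b.headD []).length _ j hj]
  have hplen : (packB (((List.range b.length).map (fun i => (b.getD i []).getD j 0)).filter (fun v => v ≠ 0))).length ≤ b.length := by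
    rw [hcolNz j]
    exact hglen j
  rw [squeeze_getD _ _ _ hi hplen, hcolNz j]
  have := EA i j hi hj
  unfold entryM at this
  rw [this, if_pos hj]

lemma move_eq_1 {b : List (List Int)} (hb : ShapeB b) : moveB 1 b = fA 1 b := by
  obtain ⟨hne, hc0, hrows⟩ := hb
  have hglen : ∀ i, (packB ((rowNz (b.getD i []) (b.headD []).length).reverse)).length ≤ (b.headD []).length := by
    intro i
    calc (packB ((rowNz (b.getD i []) (b.headD []).length).reverse)).length
        ≤ (rowNz (b.getD i []) (b.headD []).length).reverse.length := packB_length_le _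
      _ = (rowNz (b.getD i []) (b.headD []).length).length := List.length_reverse ..
      _ ≤ (b.headD []).length := rowNz_len b hrows i
  rw [fA_1, moveB_1]
  rw [show (fun (nma : List (List Int)) i => bwdLoop (rowNz (b.getD i []) (b.headD []).length)
        (fun n p v => setAt n i (((b.headD []).length : Int) + p).toNat v) (-1) 0 nma) =
      (fun (nma : List (List Int)) i => writeSeq (fun n q v => setAt n i ((b.headD []).length - 1 - q) v) 0
        (packB ((rowNz (b.getD i []) (b.headD []).length).reverse)) nma) from by
    funext nma i
    rw [bwdLoop_eq _ _ (-1) 0 nma (le_refl _) (le_refl _) (by omega),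
      show ((-1 : Int) - -1).toNat = 0 from rfl, show ((0 : Int)).toNat = 0 from rfl,
      fwdLoop_eq _ _ 0 0 nma (le_refl 0), List.drop_zero]
    apply writeSeq_congr
    intro q v M' h1 h2
    have hq : q < (b.headD []).length := by
      have := hglen i
      omega
    congr 1
    omega]
  obtain ⟨RA, EA⟩ := fold_right b.length (b.headD []).length
    (fun i => packB ((rowNz (b.getD i []) (b.headD []).length).reverse)) hglen
    b.length _ (le_refl _) (Rect_nma0 _ _) (fun i j hi hj => entry_nma0 _ _ i j)
  have hBrect : RectM ((List.range b.length).map (fun i =>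
      (squeezeB ((b.getD i []).take (b.headD []).length).reverse (b.headD []).length).reverse))
      b.length (b.headD []).length := by
    constructor
    · simp
    · intro row hrow
      simp only [List.mem_map] at hrow
      obtain ⟨i, hi, hrow⟩ := hrow
      simp only [List.mem_range] at hi
      rw [← hrow, List.length_reverse]
      apply squeeze_length
      calc (packB ((((b.getD i []).take (b.headD []).length).reverse).filter (fun v => v ≠ 0))).length
          ≤ ((((b.getD i []).take (b.headD []).length).reverse).filter (fun v => v ≠ 0)).length := packB_length_le _
        _ ≤ (((b.getD i []).take (b.headD []).length).reverse).length := List.length_filter_le _ _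
        _ ≤ (b.headD []).length := by simp
  apply matrix_eq hBrect RA
  intro i j hi hj
  have hm : b.getD i [] ∈ b := by
    rw [List.getD_eq_getElem _ _ hi]
    exact List.getElem_mem hi
  have hcr : (b.headD []).length ≤ (b.getD i []).length := hrows _ hm
  have hpk : (packB ((((b.getD i []).take (b.headD []).length).reverse).filter (fun v => v ≠ 0))).length ≤ (b.headD []).length := by
    rw [List.filter_reverse, ← rowNz_eq _ _ hcr]
    exact hglen i
  unfold entryM
  rw [entry_map_matrix b.length _ i hi]
  have hsl : (squeezeB ((b.getD i []).take (b.headD []).length).reverse (b.headD []).length).length = (b.headD []).length :=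
    squeeze_length _ _ hpk
  rw [getD_reverse' _ j (by rw [hsl]; omega), hsl,
    squeeze_getD _ _ _ (by omega) hpk,
    List.filter_reverse, ← rowNz_eq _ _ hcr]
  have := EA i j hi hj
  unfold entryM at this
  rw [this, if_pos hi]

lemma move_eq_2 {b : List (List Int)} (hb : ShapeB b) : moveB 2 b = fA 2 b := by
  obtain ⟨hne, hc0, hrows⟩ := hb
  have hglen : ∀ j, (packB ((colNz b j).reverse)).length ≤ b.length := by
    intro j
    calc (packB ((colNz b j).reverse)).length ≤ (colNz b j).reverse.length := packB_length_le _
      _ = (colNz b j).length := List.length_reverse ..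
      _ ≤ b.length := colNz_len_le b j
  rw [fA_2, moveB_2]
  rw [show (fun (nma : List (List Int)) j => bwdLoop (colNz b j)
        (fun n p v => setAt n ((b.length : Int) + p).toNat j v) (-1) 0 nma) =
      (fun (nma : List (List Int)) j => writeSeq (fun n q v => setAt n (b.length - 1 - q) j v) 0
        (packB ((colNz b j).reverse)) nma) from by
    funext nma j
    rw [bwdLoop_eq _ _ (-1) 0 nma (le_refl _) (le_refl _) (by omega),
      show ((-1 : Int) - -1).toNat = 0 from rfl, show ((0 : Int)).toNat = 0 from rfl,
      fwdLoop_eq _ _ 0 0 nma (le_refl 0), List.drop_zero]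
    apply writeSeq_congr
    intro q v M' h1 h2
    have hq : q < b.length := by
      have := hglen j
      omega
    congr 1
    omega]
  obtain ⟨RA, EA⟩ := fold_down b.length (b.headD []).length
    (fun j => packB ((colNz b j).reverse)) hglen
    (b.headD []).length _ (le_refl _) (Rect_nma0 _ _) (fun i j hi hj => entry_nma0 _ _ i j)
  have hcolNz : ∀ j, ((List.range b.length).map (fun i => (b.getD (b.length - 1 - i) []).getD j 0)).filter (fun v => v ≠ 0) = (colNz b j).reverse := by
    intro j
    rw [map_range_rev_getD b (fun row => row.getD j 0), List.filter_reverse, ← colNz_eq]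
  have hBrect : RectM ((List.range b.length).map (fun i => (List.range (b.headD []).length).map (fun j =>
      (((List.range (b.headD []).length).map (fun j =>
        squeezeB ((List.range b.length).map (fun i => (b.getD (b.length - 1 - i) []).getD j 0)) b.length)).getD j []).getD (b.length - 1 - i) 0)))
      b.length (b.headD []).length := by
    constructor
    · simp
    · intro row hrow
      simp only [List.mem_map] at hrow
      obtain ⟨i, _, hrow⟩ := hrow
      rw [← hrow]
      simp
  apply matrix_eq hBrect RA
  intro i j hi hj
  unfold entryM
  rw [entry_map_matrix b.length _ i hi, getD_map_range_int (b.headD []).length _ j hj,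
    entry_map_matrix (b.headD []).length _ j hj]
  have hplen : (packB (((List.range b.length).map (fun i => (b.getD (b.length - 1 - i) []).getD j 0)).filter (fun v => v ≠ 0))).length ≤ b.length := by
    rw [hcolNz j]
    exact hglen j
  rw [squeeze_getD _ _ _ (by omega) hplen, hcolNz j]
  have := EA i j hi hj
  unfold entryM at this
  rw [this, if_pos hj]

lemma move_eq_3 {b : List (List Int)} (hb : ShapeB b) : moveB 3 b = fA 3 b := by
  obtain ⟨hne, hc0, hrows⟩ := hb
  have hglen : ∀ i, (packB (rowNz (b.getD i []) (b.headD []).length)).length ≤ (b.headD []).length :=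
    fun i => le_trans (packB_length_le _) (rowNz_len b hrows i)
  rw [fA_3, moveB_3]
  rw [show (fun (nma : List (List Int)) i => fwdLoop (rowNz (b.getD i []) (b.headD []).length)
        (fun n p v => setAt n i p v) 0 0 nma) =
      (fun (nma : List (List Int)) i => writeSeq (fun n q v => setAt n i q v) 0
        (packB (rowNz (b.getD i []) (b.headD []).length)) nma) from by
    funext nma i
    rw [fwdLoop_eq _ _ 0 0 nma (le_refl 0), List.drop_zero]]
  obtain ⟨RA, EA⟩ := fold_left b.length (b.headD []).length
    (fun i => packB (rowNz (b.getD i []) (b.headD []).length)) hglen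
    b.length _ (le_refl _) (Rect_nma0 _ _) (fun i j hi hj => entry_nma0 _ _ i j)
  have hBrect : RectM ((List.range b.length).map (fun i =>
      squeezeB ((b.getD i []).take (b.headD []).length) (b.headD []).length))
      b.length (b.headD []).length := by
    constructor
    · simp
    · intro row hrow
      simp only [List.mem_map] at hrow
      obtain ⟨i, hi, hrow⟩ := hrow
      simp only [List.mem_range] at hi
      rw [← hrow]
      apply squeeze_length
      exact le_trans (packB_length_le _) (le_trans (List.length_filter_le _ _) (by simp))
  apply matrix_eq hBrect RA
  intro i j hi hj
  have hm : b.getD i [] ∈ b := by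
    rw [List.getD_eq_getElem _ _ hi]
    exact List.getElem_mem hi
  have hcr : (b.headD []).length ≤ (b.getD i []).length := hrows _ hm
  have hpk : (packB (((b.getD i []).take (b.headD []).length).filter (fun v => v ≠ 0))).length ≤ (b.headD []).length := by
    rw [← rowNz_eq _ _ hcr]
    exact hglen i
  unfold entryM
  rw [entry_map_matrix b.length _ i hi,
    squeeze_getD _ _ _ hj hpk, ← rowNz_eq _ _ hcr]
  have := EA i j hi hj
  unfold entryM at this
  rw [this, if_pos hi]

lemma Shape_of_Rect {M : List (List Int)} {r c : Nat} (h : RectM M r c)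
    (hr : 0 < r) (hc : 0 < c) : ShapeB M := by
  obtain ⟨hl, hrow⟩ := h
  cases M with
  | nil => simp at hl; omega
  | cons row rest =>
    refine ⟨by simp, ?_, ?_⟩
    · simpa [List.headD, hrow row (by simp)] using hc
    · intro row' hrow'
      rw [show ((row :: rest).headD []) = row from rfl, hrow row (by simp), hrow row' hrow']

lemma Rect_moveB (d : Int) (hd : d = 0 ∨ d = 1 ∨ d = 2 ∨ d = 3) (b : List (List Int)) :
    RectM (moveB d b) b.length (b.headD []).length := by
  rcases hd with rfl | rfl | rfl | rfl
  · rw [moveB_0]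
    refine ⟨by simp, ?_⟩
    intro row hrow
    simp only [List.mem_map] at hrow
    obtain ⟨i, _, hrow⟩ := hrow
    rw [← hrow]
    simp
  · rw [moveB_1]
    refine ⟨by simp, ?_⟩
    intro row hrow
    simp only [List.mem_map] at hrow
    obtain ⟨i, _, hrow⟩ := hrow
    rw [← hrow, List.length_reverse]
    exact squeeze_length _ _ (le_trans (packB_length_le _)
      (le_trans (List.length_filter_le _ _) (by simp)))
  · rw [moveB_2]
    refine ⟨by simp, ?_⟩
    intro row hrow
    simp only [List.mem_map] at hrow
    obtain ⟨i, _, hrow⟩ := hrow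
    rw [← hrow]
    simp
  · rw [moveB_3]
    refine ⟨by simp, ?_⟩
    intro row hrow
    simp only [List.mem_map] at hrow
    obtain ⟨i, _, hrow⟩ := hrow
    rw [← hrow]
    exact squeeze_length _ _ (le_trans (packB_length_le _)
      (le_trans (List.length_filter_le _ _) (by simp)))

lemma Shape_moveB {b : List (List Int)} (hb : ShapeB b) (d : Int)
    (hd : d = 0 ∨ d = 1 ∨ d = 2 ∨ d = 3) : ShapeB (moveB d b) := by
  refine Shape_of_Rect (Rect_moveB d hd b) ?_ hb.2.1
  have := hb.1
  cases b
  · simp at this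
  · simp

-- ===== the search-side lemmas =====

def supD (g : List (List Int) → Int) (l : List (List (List Int))) : Int :=
  l.foldl (fun a b => max a (g b)) 0

def bMax (b : List (List Int)) : Int :=
  b.foldl (fun a row => row.foldl max a) 0

lemma foldl_max_shift (l : List Int) : ∀ a b : Int, l.foldl max (max a b) = max a (l.foldl max b) := by
  induction l with
  | nil => intro a b; rfl
  | cons x t ih =>
    intro a b
    rw [List.foldl_cons, List.foldl_cons, max_assoc, ih a (max b x)]

lemma board_shift (bs : List (List Int)) : ∀ a b : Int, 0 ≤ b →
    bs.foldl (fun a row => row.foldl max a) (max a b) = max a (bs.foldl (fun a row => row.foldl max a) b) := by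
  induction bs with
  | nil => intro a b _; rfl
  | cons row t ih =>
    intro a b hb
    rw [List.foldl_cons, List.foldl_cons]
    beta_reduce
    rw [foldl_max_shift row a b, ih a _ (le_trans hb (PySem.List.le_foldl_max row b).1)]

lemma bMax_nonneg (b : List (List Int)) : 0 ≤ bMax b := by
  have h := board_shift b 0 0 (le_refl 0)
  rw [max_self 0] at h
  unfold bMax
  rw [h]
  exact le_max_left 0 _

lemma maxOverB_eq_supD (s : List (List (List Int))) : maxOverB s = supD bMax s := by
  unfold maxOverB supD
  rw [show (fun (best : Int) (v : Int) => if v > best then v else best) = @max Int _ from by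
    funext a v
    by_cases h : v ≤ a
    · rw [if_neg (by omega), max_eq_left h]
    · rw [if_pos (by omega), max_eq_right (by omega)]]
  have aux : ∀ (t : List (List (List Int))) (a : Int), 0 ≤ a →
      t.foldl (fun best b => b.foldl (fun best row => row.foldl max best) best) a =
      t.foldl (fun x b => max x (bMax b)) a := by
    intro t
    induction t with
    | nil => intro a _; rfl
    | cons b t ih =>
      intro a ha
      rw [List.foldl_cons, List.foldl_cons]
      beta_reduce
      have h1 : b.foldl (fun best row => row.foldl max best) a = max a (bMax b) := by
        have := board_shift b a 0 (le_refl 0)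
        rw [max_eq_left ha] at this
        unfold bMax
        exact this
      rw [h1, ih _ (le_trans ha (le_max_left a (bMax b)))]
  exact aux s 0 (le_refl 0)

lemma supD_nonneg (g : List (List Int) → Int) (l : List (List (List Int))) : 0 ≤ supD g l :=
  (PySem.List.le_foldl_max_int l g 0).1

lemma le_supD (g : List (List Int) → Int) (l : List (List (List Int))) :
    ∀ x ∈ l, g x ≤ supD g l :=
  (PySem.List.le_foldl_max_int l g 0).2

lemma supD_le (g : List (List Int) → Int) (l : List (List (List Int))) (cap : Int)
    (h0 : 0 ≤ cap) (h : ∀ x ∈ l, g x ≤ cap) : supD g l ≤ cap := by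
  unfold supD
  have aux : ∀ (t : List (List (List Int))) (a : Int), a ≤ cap → (∀ x ∈ t, g x ≤ cap) →
      t.foldl (fun a b => max a (g b)) a ≤ cap := by
    intro t
    induction t with
    | nil => intro a ha _; exact ha
    | cons b t ih =>
      intro a ha hx
      rw [List.foldl_cons]
      exact ih _ (max_le ha (hx b (by simp))) (fun x hxt => hx x (by simp [hxt]))
  exact aux l 0 h0 h

lemma supD_eq_of_mem_iff (g : List (List Int) → Int) (l1 l2 : List (List (List Int)))
    (h : ∀ x, x ∈ l1 ↔ x ∈ l2) : supD g l1 = supD g l2 := by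
  apply le_antisymm
  · exact supD_le g l1 _ (supD_nonneg g l2) (fun x hx => le_supD g l2 x ((h x).1 hx))
  · exact supD_le g l2 _ (supD_nonneg g l1) (fun x hx => le_supD g l1 x ((h x).2 hx))

lemma supD_congr (g1 g2 : List (List Int) → Int) (l : List (List (List Int)))
    (h : ∀ x ∈ l, g1 x = g2 x) : supD g1 l = supD g2 l := by
  unfold supD
  have aux : ∀ (t : List (List (List Int))) (a : Int), (∀ x ∈ t, g1 x = g2 x) →
      t.foldl (fun a b => max a (g1 b)) a = t.foldl (fun a b => max a (g2 b)) a := by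
    intro t
    induction t with
    | nil => intro a _; rfl
    | cons b t ih =>
      intro a hx
      rw [List.foldl_cons, List.foldl_cons]
      simp only [hx b (by simp)]
      exact ih _ (fun x hxt => hx x (by simp [hxt]))
  exact aux l 0 h

lemma supD_append (g : List (List Int) → Int) (l1 l2 : List (List (List Int))) :
    supD g (l1 ++ l2) = max (supD g l1) (supD g l2) := by
  have shift : ∀ (t : List (List (List Int))) (a b : Int), 0 ≤ b →
      t.foldl (fun x y => max x (g y)) (max a b) = max a (t.foldl (fun x y => max x (g y)) b) := by
    intro t
    induction t with
    | nil => intro a b _; rfl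
    | cons x t ih =>
      intro a b hb
      rw [List.foldl_cons, List.foldl_cons]
      beta_reduce
      rw [max_assoc, ih a _ (le_trans hb (le_max_left b (g x)))]
  unfold supD
  rw [List.foldl_append]
  conv_lhs => rw [show List.foldl (fun a b => max a (g b)) 0 l1 =
      max (List.foldl (fun a b => max a (g b)) 0 l1) 0 from
    (max_eq_left (supD_nonneg g l1)).symm]
  exact shift l2 _ 0 (le_refl 0)

lemma supD_flatMap (g : List (List Int) → Int) (h : List (List Int) → List (List (List Int)))
    (l : List (List (List Int))) : supD g (l.flatMap h) = supD (fun b => supD g (h b)) l := by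
  induction l with
  | nil => rfl
  | cons b t ih =>
    rw [List.flatMap_cons, supD_append, ih]
    have shift : ∀ (t : List (List (List Int))) (a c : Int), 0 ≤ c →
        t.foldl (fun x y => max x (supD g (h y))) (max a c) =
        max a (t.foldl (fun x y => max x (supD g (h y))) c) := by
      intro t
      induction t with
      | nil => intro a c _; rfl
      | cons x t ih2 =>
        intro a c hc
        rw [List.foldl_cons, List.foldl_cons]
        beta_reduce
        rw [max_assoc, ih2 a _ (le_trans hc (le_max_left c _))]
    show _ = List.foldl (fun a b => max a (supD g (h b))) 0 (b :: t)
    rw [List.foldl_cons]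
    have h0 : (max (0 : Int) (supD g (h b))) = max (supD g (h b)) 0 := max_comm _ _
    rw [h0, shift t _ 0 (le_refl 0)]
    rfl

lemma baseMax_eq_bMax (b : List (List Int)) (h : ∀ row ∈ b, row ≠ []) : baseMax b = bMax b := by
  unfold baseMax bMax
  have aux : ∀ (t : List (List Int)) (a : Int), (∀ row ∈ t, row ≠ []) →
      t.foldl (fun ans row => max ans ((PySem.List.max? row (fun x => x)).getD 0)) a =
      t.foldl (fun a row => row.foldl max a) a := by
    intro t
    induction t with
    | nil => intro a _; rfl
    | cons row t ih =>
      intro a hrow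
      rw [List.foldl_cons, List.foldl_cons]
      cases row with
      | nil => exact absurd rfl (hrow [] (by simp))
      | cons x rest =>
        beta_reduce
        rw [PySem.List.max?_id_cons, Option.getD_some, List.foldl_cons, foldl_max_shift]
        exact ih _ (fun r hr => hrow r (by simp [hr]))
  exact aux b 0 h

lemma dfs_zero (b : List (List Int)) : dfs b 0 = baseMax b := by
  rw [dfs]; simp

lemma dfs_succ (b : List (List Int)) (n : Nat) :
    dfs b ((n : Int) + 1) =
      max (max (max (max 0 (dfs (fA 0 b) n)) (dfs (fA 1 b) n)) (dfs (fA 2 b) n)) (dfs (fA 3 b) n) := by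
  have h1 : ¬((n : Int) + 1 = 0) := by omega
  have h2 : ¬((n : Int) + 1 < 0) := by omega
  rw [dfs, if_neg h1, if_neg h2]
  simp only [add_sub_cancel_right]

lemma sup_level (n : Nat) : ∀ S : List (List (List Int)), (∀ b ∈ S, ShapeB b) →
    supD bMax (levelB n S) = supD (fun b => dfs b (n : Int)) S := by
  induction n with
  | zero =>
    intro S hS
    rw [levelB]
    apply supD_congr
    intro b hb
    obtain ⟨hne, hc0, hrows⟩ := hS b hb
    have hrne : ∀ row ∈ b, row ≠ [] := by
      intro row hr hcon
      have := hrows row hr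
      rw [hcon] at this
      simp only [List.length_nil] at this
      omega
    rw [show ((0 : Nat) : Int) = 0 from rfl, dfs_zero, baseMax_eq_bMax b hrne]
  | succ n ih =>
    intro S hS
    rw [levelB]
    have hShape : ∀ b' ∈ PySem.Set.ofList (S.flatMap (fun b => [moveB 0 b, moveB 1 b, moveB 2 b, moveB 3 b])), ShapeB b' := by
      intro b' hb'
      rw [PySem.Set.mem_ofList] at hb'
      rw [List.mem_flatMap] at hb'
      obtain ⟨b, hb, hmem⟩ := hb'
      simp only [List.mem_cons, List.mem_singleton] at hmem
      rcases hmem with rfl | rfl | rfl | (rfl | h)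
      · exact Shape_moveB (hS b hb) 0 (by norm_num)
      · exact Shape_moveB (hS b hb) 1 (by norm_num)
      · exact Shape_moveB (hS b hb) 2 (by norm_num)
      · exact Shape_moveB (hS b hb) 3 (by norm_num)
      · simp at h
    rw [ih _ hShape,
      supD_eq_of_mem_iff _ _ (S.flatMap (fun b => [moveB 0 b, moveB 1 b, moveB 2 b, moveB 3 b]))
        (fun x => PySem.Set.mem_ofList _ x),
      supD_flatMap]
    apply supD_congr
    intro b hb
    have hsb := hS b hb
    have hlist : supD (fun x => dfs x (n : Int)) [moveB 0 b, moveB 1 b, moveB 2 b, moveB 3 b] =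
        max (max (max (max 0 (dfs (moveB 0 b) n)) (dfs (moveB 1 b) n)) (dfs (moveB 2 b) n)) (dfs (moveB 3 b) n) := rfl
    rw [hlist, move_eq_0 hsb, move_eq_1 hsb, move_eq_2 hsb, move_eq_3 hsb, ← dfs_succ,
      show (((n + 1 : Nat)) : Int) = (n : Int) + 1 from by push_cast; ring]

lemma dfs_nonneg (ma : List (List Int)) (step : Int) : 0 ≤ dfs ma step := by
  rw [dfs]
  split
  · exact (PySem.List.le_foldl_max_int ma _ 0).1
  · split
    · exact le_refl 0
    · exact le_trans (le_trans (le_trans (le_trans (le_max_left _ _) (le_max_left _ _))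
        (le_max_left _ _)) (le_max_left _ _)) (le_refl _)

lemma dfs_eq_alt (ma : List (List Int)) (step : Int) (h : Pre_dfs ma step) :
    dfs ma step = dfs_alt ma step := by
  obtain ⟨hstep, hrest⟩ := h
  unfold dfs_alt
  have hof : PySem.Set.ofList [ma] = [ma] := rfl
  rw [hof, maxOverB_eq_supD]
  by_cases h0 : step = 0
  · subst h0
    rw [show (0 : Int).toNat = 0 from rfl, levelB]
    rw [if_pos rfl] at hrest
    rw [dfs_zero]
    show baseMax ma = supD bMax [ma]
    rw [show supD bMax [ma] = max 0 (bMax ma) from rfl, max_eq_right (bMax_nonneg ma),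
      baseMax_eq_bMax ma hrest]
  · rw [if_neg h0] at hrest
    obtain ⟨hne, hc0, hrows⟩ := hrest
    have hShape : ∀ b ∈ [ma], ShapeB b := by
      intro b hb
      rw [List.mem_singleton] at hb
      subst hb
      exact ⟨hne, hc0, hrows⟩
    rw [sup_level step.toNat [ma] hShape]
    have hcast : ((step.toNat : Nat) : Int) = step := by omega
    rw [show supD (fun b => dfs b (step.toNat : Int)) [ma] = max 0 (dfs ma (step.toNat : Int)) from rfl,
      hcast, max_eq_right (dfs_nonneg ma step)]

-- ===== VERDICT (by name: the statement is the Claim_ definition above) =====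
theorem dfs_spec : Claim_equal_dfs := by
  intro ma step _ hpre
  unfold Spec_dfs
  exact dfs_eq_alt ma step hpre
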